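-- pv_equiv track=rewrite | github.com/bellDev-code/Challenge_Algorithm | programmers/Ohsulgi/today06/13-todayChallenge.py | solution
-- ===== SOURCE A (Python) =====
-- def solution(board):
--     for i in range(len(board)):
--         for j in range(len(board)):
--             if board[i][j] == 1:
--                 for m in range(max(i-1, 0), min(i+2, len(board))):
--                     for n in range(max(j-1, 0), min(j+2, len(board))):
--                         if board[m][n] == 0:
--                             board[m][n] = 2
--
--     answer = 0
--     for k in range(len(board)):
--         answer += board[k].count(0)
--     return answer
-- ===== SOURCE B (Python) =====
-- def solution(board):
--     # Mark each 0 cell whose 8-neighborhood contains a 1, then count remaining zeros.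
--     n = len(board)
--     for i in range(n):
--         for j in range(n):
--             if board[i][j] == 0 and any(
--                     board[m][k] == 1
--                     for m in range(max(i - 1, 0), min(i + 2, n))
--                     for k in range(max(j - 1, 0), min(j + 2, n))):
--                 board[i][j] = 2
--     return sum(row.count(0) for row in board)
-- ===== Notes on version B (the rewrite author's own statement) =====
-- stated objective: alternative
-- what changed: A spreads 2s outward from every 1-cell and then counts zeros; B inverts the marking: a single scan that, for each 0 cell, queries its 8-neighborhood for a 1 and marks it 2, followed by the zero count. Pre_ excludes boards with a row shorter than len(board), on which A raises IndexError.
import Mathlib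
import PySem

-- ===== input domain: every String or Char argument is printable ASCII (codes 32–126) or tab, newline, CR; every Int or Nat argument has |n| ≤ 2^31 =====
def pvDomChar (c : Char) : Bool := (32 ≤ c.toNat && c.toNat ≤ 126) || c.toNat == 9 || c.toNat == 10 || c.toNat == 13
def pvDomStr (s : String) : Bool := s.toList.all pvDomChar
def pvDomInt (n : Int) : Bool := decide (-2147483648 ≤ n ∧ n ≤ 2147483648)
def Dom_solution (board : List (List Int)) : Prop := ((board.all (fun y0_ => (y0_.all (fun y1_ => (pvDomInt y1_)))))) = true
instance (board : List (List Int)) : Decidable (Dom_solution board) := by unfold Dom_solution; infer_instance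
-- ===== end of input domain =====

-- B inverts A's marking: instead of spreading 2s outward from every 1, it tests each 0's
-- 8-neighborhood for a 1 and marks it, then counts the remaining zeros; both programs perform
-- the same in-place mutation, and the equivalence proved is about the return value.

-- ===== PORT A =====
-- shared cell helpers: board[i][j] read / write with Nat indices (all Python indices here are
-- produced by range(...) and hence nonnegative, so plain Nat indexing is exact; out-of-range
-- reads, where Python raises IndexError, are excluded by Pre_solution below)
def pvCell (b : List (List Int)) (i j : Nat) : Int := (b.getD i []).getD j 0

def pvSet (b : List (List Int)) (i j : Nat) (v : Int) : List (List Int) :=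
  b.modify i (fun row => row.set j v)

-- range(max(i-1,0), min(i+2,n)) : Nat subtraction i-1 is exactly max(i-1,0)
def pvWin (i n : Nat) : List Nat := List.range' (i - 1) (min (i + 2) n - (i - 1))

-- body of A's outer double loop: spread 2s from a 1 at (i,j)
def markStep (n : Nat) (b : List (List Int)) (i j : Nat) : List (List Int) :=
  if pvCell b i j = 1 then
    (pvWin i n).foldl (fun b m =>
      (pvWin j n).foldl (fun b k =>
        if pvCell b m k = 0 then pvSet b m k 2 else b) b) b
  else b

def solution (board : List (List Int)) : Int :=
  let n := board.length
  let b := (List.range n).foldl (fun b i =>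
    (List.range n).foldl (fun b j => markStep n b i j) b) board
  (List.range n).foldl (fun ans k => ans + (PySem.List.count (b.getD k []) 0 : Int)) 0

-- ===== PORT B =====
-- any(board[m][k] == 1 for m in range(max(i-1,0),min(i+2,n)) for k in range(max(j-1,0),min(j+2,n)))
def near1B (b : List (List Int)) (n i j : Nat) : Bool :=
  (pvWin i n).any fun m => (pvWin j n).any fun k => pvCell b m k == 1

-- if board[i][j] == 0 and any(...): board[i][j] = 2
def markStepB (n : Nat) (b : List (List Int)) (i j : Nat) : List (List Int) :=
  if pvCell b i j = 0 ∧ near1B b n i j = true then pvSet b i j 2 else b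

def solution_alt (board : List (List Int)) : Int :=
  let n := board.length
  let b := (List.range n).foldl (fun b i =>
    (List.range n).foldl (fun b j => markStepB n b i j) b) board
  b.foldl (fun ans row => ans + (PySem.List.count row 0 : Int)) 0

-- ===== PRECONDITION & SPEC =====
-- Pre_ excludes exactly the boards with a row shorter than len(board): there A's read
-- board[i][j] (or board[m][n]) raises IndexError; on every other board A returns normally.
def Pre_solution (board : List (List Int)) : Prop :=
  ∀ row ∈ board, board.length ≤ row.length
instance (board : List (List Int)) : Decidable (Pre_solution board) := by
  unfold Pre_solution; infer_instance

def pvWitness_solution : List (List Int) := [[1, 0], [0, 0]]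

def Spec_solution (board : List (List Int)) (out : Int) : Prop := out = solution_alt board
instance (board : List (List Int)) (out : Int) : Decidable (Spec_solution board out) := by
  unfold Spec_solution; infer_instance

-- ===== CLAIM (what is proved, stated in full; the proofs are below) =====
def Claim_equal_solution : Prop := ∀ (board : List (List Int)), Dom_solution board → Pre_solution board → Spec_solution board (solution board)

-- ===== LEMMAS AND PROOFS =====

-- invariant: b is b0 with exactly the zero cells selected by s overwritten by 2, shape unchanged
def CellInv (b0 : List (List Int)) (s : Nat → Nat → Bool) (b : List (List Int)) : Prop :=
  b.length = b0.length ∧ (∀ i, (b.getD i []).length = (b0.getD i []).length) ∧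
  ∀ i j, pvCell b i j = if s i j && (pvCell b0 i j == 0) then 2 else pvCell b0 i j

lemma getD_set_int (row : List Int) (k : Nat) (v : Int) (j : Nat) :
    (row.set k v).getD j 0 = if k = j ∧ k < row.length then v else row.getD j 0 := by
  simp only [List.getD_eq_getElem?_getD, List.getElem?_set]
  by_cases hkj : k = j
  · subst hkj
    by_cases hk : k < row.length
    · simp [hk]
    · simp [hk]
  · simp [hkj]

lemma getD_pvSet_row (b : List (List Int)) (m k : Nat) (v : Int) (i : Nat) :
    (pvSet b m k v).getD i [] =
      if m = i ∧ m < b.length then (b.getD m []).set k v else b.getD i [] := by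
  unfold pvSet
  by_cases hmi : m = i
  · subst hmi
    by_cases hm : m < b.length
    · simp [List.getD_eq_getElem?_getD, hm]
    · simp [List.getD_eq_getElem?_getD, hm]
  · simp [List.getD_eq_getElem?_getD, hmi]

lemma cell_pvSet (b : List (List Int)) (m k : Nat) (v : Int) (i j : Nat) :
    pvCell (pvSet b m k v) i j =
      if m = i ∧ k = j ∧ m < b.length ∧ k < (b.getD m []).length then v
      else pvCell b i j := by
  unfold pvCell
  rw [getD_pvSet_row]
  by_cases h : m = i ∧ m < b.length
  · obtain ⟨rfl, hm⟩ := h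
    rw [if_pos ⟨rfl, hm⟩, getD_set_int]
    by_cases hkj : k = j ∧ k < (b.getD m []).length
    · rw [if_pos hkj, if_pos ⟨rfl, hkj.1, hm, hkj.2⟩]
    · rw [if_neg hkj, if_neg (by tauto)]
  · rw [if_neg h, if_neg (by tauto)]

lemma length_pvSet (b : List (List Int)) (m k : Nat) (v : Int) :
    (pvSet b m k v).length = b.length := List.length_modify ..

lemma rowlen_pvSet (b : List (List Int)) (m k : Nat) (v : Int) (i : Nat) :
    ((pvSet b m k v).getD i []).length = ((b.getD i []).length) := by
  rw [getD_pvSet_row]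
  split_ifs with h
  · obtain ⟨rfl, _⟩ := h
    simp [List.length_set]
  · rfl

lemma mem_pvWin (m i nn : Nat) : m ∈ pvWin i nn ↔ i - 1 ≤ m ∧ m < min (i + 2) nn := by
  unfold pvWin
  rw [List.mem_range'_1]
  omega

lemma foldl_nest {α β γ : Type} (f : α → β → γ → α) (A : List β) (B : List γ) (a : α) :
    A.foldl (fun a m => B.foldl (fun a k => f a m k) a) a
      = (A.flatMap fun m => B.map (fun k => (m, k))).foldl (fun a p => f a p.1 p.2) a := by
  induction A generalizing a with
  | nil => rfl
  | cons m A ih => simp [List.flatMap_cons, List.foldl_append, List.foldl_map, ih]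

lemma pre_rowlen (b0 : List (List Int)) (h : Pre_solution b0) (i : Nat) (hi : i < b0.length) :
    b0.length ≤ (b0.getD i []).length := by
  rw [List.getD_eq_getElem _ _ hi]
  exact h _ (List.getElem_mem hi)

-- conditional writes of 2 over a list of positions (the flattened inner double loop of A)
def wz (b : List (List Int)) (ps : List (Nat × Nat)) : List (List Int) :=
  ps.foldl (fun b p => if pvCell b p.1 p.2 = 0 then pvSet b p.1 p.2 2 else b) b

lemma wz_length (ps : List (Nat × Nat)) (b : List (List Int)) :
    (wz b ps).length = b.length := by
  induction ps generalizing b with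
  | nil => rfl
  | cons hd tl ih =>
    show (wz (if pvCell b hd.1 hd.2 = 0 then pvSet b hd.1 hd.2 2 else b) tl).length = _
    rw [ih]
    split_ifs <;> simp [length_pvSet]

lemma wz_rowlen (ps : List (Nat × Nat)) (b : List (List Int)) (i : Nat) :
    ((wz b ps).getD i []).length = (b.getD i []).length := by
  induction ps generalizing b with
  | nil => rfl
  | cons hd tl ih =>
    show ((wz (if pvCell b hd.1 hd.2 = 0 then pvSet b hd.1 hd.2 2 else b) tl).getD i []).length = _
    rw [ih]
    split_ifs <;> first | exact rowlen_pvSet .. | rfl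

lemma wz_cell (ps : List (Nat × Nat)) (b : List (List Int)) (i j : Nat) :
    pvCell (wz b ps) i j =
      if (i, j) ∈ ps ∧ pvCell b i j = 0 ∧ i < b.length ∧ j < (b.getD i []).length then 2
      else pvCell b i j := by
  induction ps generalizing b with
  | nil => simp [wz]
  | cons hd tl ih =>
    obtain ⟨m, k⟩ := hd
    show pvCell (wz (if pvCell b m k = 0 then pvSet b m k 2 else b) tl) i j = _
    by_cases hmk : pvCell b m k = 0
    · rw [if_pos hmk, ih]
      have hlen : (pvSet b m k 2).length = b.length := length_pvSet ..
      have hrow : ((pvSet b m k 2).getD i []).length = (b.getD i []).length := rowlen_pvSet ..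
      have hcell : pvCell (pvSet b m k 2) i j =
          if m = i ∧ k = j ∧ m < b.length ∧ k < (b.getD m []).length then 2 else pvCell b i j :=
        cell_pvSet ..
      rw [hlen, hrow, hcell]
      by_cases hC : m = i ∧ k = j ∧ m < b.length ∧ k < (b.getD m []).length
      · obtain ⟨rfl, rfl, hm, hk⟩ := hC
        have h2 : (if m = m ∧ k = k ∧ m < b.length ∧ k < (b.getD m []).length then (2 : Int)
            else pvCell b m k) = 2 := if_pos ⟨rfl, rfl, hm, hk⟩
        rw [h2]
        rw [if_neg (fun hx => absurd hx.2.1 (by norm_num))]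
        rw [if_pos ⟨List.mem_cons.mpr (Or.inl rfl), hmk, hm, hk⟩]
      · rw [if_neg hC]
        by_cases hT : (i, j) ∈ tl ∧ pvCell b i j = 0 ∧ i < b.length ∧ j < (b.getD i []).length
        · rw [if_pos hT, if_pos ⟨List.mem_cons.mpr (Or.inr hT.1), hT.2⟩]
        · rw [if_neg hT, if_neg ?s1]
          case s1 =>
            rintro ⟨hmem, hc0, hri, hrj⟩
            rcases List.mem_cons.mp hmem with heq | hm'
            · cases heq
              exact hC ⟨rfl, rfl, hri, hrj⟩
            · exact hT ⟨hm', hc0, hri, hrj⟩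
    · rw [if_neg hmk, ih]
      by_cases hT : (i, j) ∈ tl ∧ pvCell b i j = 0 ∧ i < b.length ∧ j < (b.getD i []).length
      · rw [if_pos hT, if_pos ⟨List.mem_cons.mpr (Or.inr hT.1), hT.2⟩]
      · rw [if_neg hT, if_neg ?s2]
        case s2 =>
          rintro ⟨hmem, hc0, hri, hrj⟩
          rcases List.mem_cons.mp hmem with heq | hm'
          · cases heq
            exact hmk hc0
          · exact hT ⟨hm', hc0, hri, hrj⟩

def winPairs (p q nn : Nat) : List (Nat × Nat) :=
  (pvWin p nn).flatMap fun m => (pvWin q nn).map (fun k => (m, k))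

lemma mem_winPairs (p q nn i j : Nat) :
    (i, j) ∈ winPairs p q nn ↔ i ∈ pvWin p nn ∧ j ∈ pvWin q nn := by
  simp only [winPairs, List.mem_flatMap, List.mem_map, Prod.mk.injEq]
  constructor
  · rintro ⟨m, hm, k, hk, rfl, rfl⟩
    exact ⟨hm, hk⟩
  · rintro ⟨hi, hj⟩
    exact ⟨i, hi, j, hj, rfl, rfl⟩

lemma markStep_eq_wz (nn : Nat) (b : List (List Int)) (i j : Nat) :
    markStep nn b i j = if pvCell b i j = 1 then wz b (winPairs i j nn) else b := by
  unfold markStep wz winPairs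
  by_cases h : pvCell b i j = 1 <;>
    simp [h, foldl_nest (fun b m k => if pvCell b m k = 0 then pvSet b m k 2 else b)]

lemma CellInv_congr (b0 : List (List Int)) (s s' : Nat → Nat → Bool) (b : List (List Int))
    (h : ∀ i j, pvCell b0 i j = 0 → s i j = s' i j) (hinv : CellInv b0 s b) :
    CellInv b0 s' b := by
  obtain ⟨h1, h2, h3⟩ := hinv
  refine ⟨h1, h2, fun i j => ?_⟩
  rw [h3]
  by_cases hc : pvCell b0 i j = 0
  · rw [h _ _ hc]
  · simp [beq_iff_eq, hc]

lemma near1B_inv (b0 : List (List Int)) (s : Nat → Nat → Bool) (b : List (List Int))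
    (hinv : CellInv b0 s b) (nn i j : Nat) : near1B b nn i j = near1B b0 nn i j := by
  have hcell : ∀ m k, (pvCell b m k == 1) = (pvCell b0 m k == 1) := by
    intro m k
    rw [hinv.2.2 m k]
    by_cases hc : (s m k && (pvCell b0 m k == 0)) = true
    · rw [if_pos hc]
      have h0 : pvCell b0 m k = 0 := by
        have := (Bool.and_eq_true _ _).mp hc
        simpa [beq_iff_eq] using this.2
      simp [h0]
    · rw [if_neg hc]
  simp only [near1B, hcell]

def covB (b0 : List (List Int)) (nn : Nat) (P : List (Nat × Nat)) (i j : Nat) : Bool :=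
  P.any fun p => (pvCell b0 p.1 p.2 == 1) && decide (i ∈ pvWin p.1 nn) && decide (j ∈ pvWin p.2 nn)

lemma markA_fold (b0 : List (List Int)) (hpre : Pre_solution b0) :
    ∀ (P : List (Nat × Nat)) (s : Nat → Nat → Bool) (b : List (List Int)),
    (∀ p ∈ P, p.1 < b0.length ∧ p.2 < b0.length) →
    CellInv b0 s b →
    CellInv b0 (fun i j => covB b0 b0.length P i j || s i j)
      (P.foldl (fun b p => markStep b0.length b p.1 p.2) b) := by
  intro P
  induction P with
  | nil =>
    intro s b hP hinv
    exact CellInv_congr _ _ _ _ (fun i j _ => by simp [covB]) hinv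
  | cons hd tl ih =>
    obtain ⟨p, q⟩ := hd
    intro s b hP hinv
    rw [List.foldl_cons]
    show CellInv b0 _ (tl.foldl _ (markStep b0.length b p q))
    rw [markStep_eq_wz]
    obtain ⟨hl, hr, hc⟩ := hinv
    have hc1 : (pvCell b p q = 1) ↔ (pvCell b0 p q = 1) := by
      rw [hc p q]
      by_cases hz : (s p q && (pvCell b0 p q == 0)) = true
      · rw [if_pos hz]
        have h0 : pvCell b0 p q = 0 := by
          simpa [beq_iff_eq] using ((Bool.and_eq_true _ _).mp hz).2
        constructor
        · intro h; norm_num at h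
        · intro h; rw [h0] at h; norm_num at h
      · rw [if_neg hz]
    have hPtl : ∀ r ∈ tl, r.1 < b0.length ∧ r.2 < b0.length :=
      fun r hr => hP r (List.mem_cons_of_mem _ hr)
    by_cases h1 : pvCell b0 p q = 1
    · rw [if_pos (hc1.mpr h1)]
      have hinv' : CellInv b0
          (fun i j => (decide (i ∈ pvWin p b0.length) && decide (j ∈ pvWin q b0.length)) || s i j)
          (wz b (winPairs p q b0.length)) := by
        refine ⟨by rw [wz_length, hl], fun i => by rw [wz_rowlen, hr], fun i j => ?_⟩
        rw [wz_cell]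
        by_cases hz : pvCell b0 i j = 0
        · by_cases hs : s i j = true
          · have hcb : pvCell b i j = 2 := by rw [hc i j]; simp [hs, hz]
            rw [if_neg (fun hx => absurd (hcb ▸ hx.2.1) (by norm_num))]
            rw [hcb, if_pos (by simp [hs, hz])]
          · have hcb : pvCell b i j = pvCell b0 i j := by rw [hc i j]; simp [hs]
            by_cases hw : i ∈ pvWin p b0.length ∧ j ∈ pvWin q b0.length
            · have hi : i < b0.length := by have := (mem_pvWin i p b0.length).mp hw.1; omega
              have hj : j < b0.length := by have := (mem_pvWin j q b0.length).mp hw.2; omega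
              rw [if_pos ⟨(mem_winPairs ..).mpr hw, by rw [hcb, hz], by rw [hl]; exact hi,
                by rw [hr]; exact lt_of_lt_of_le hj (pre_rowlen b0 hpre i hi)⟩]
              rw [if_pos (by simp [hw.1, hw.2, hz])]
            · have hnm : ¬ ((i, j) ∈ winPairs p q b0.length) :=
                fun hx => hw ((mem_winPairs ..).mp hx)
              rw [if_neg (fun hx => hnm hx.1), hcb, if_neg ?noc]
              case noc =>
                simp only [Bool.and_eq_true, Bool.or_eq_true, decide_eq_true_eq, beq_iff_eq]
                rintro ⟨hor, -⟩
                rcases hor with ⟨ha, hb⟩ | hs'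
                · exact hw ⟨ha, hb⟩
                · exact hs hs'
        · have hcb : pvCell b i j = pvCell b0 i j := by rw [hc i j]; simp [hz]
          rw [if_neg (fun hx => hz (hcb ▸ hx.2.1)), hcb, if_neg (by simp [hz])]
      have hres := ih _ _ hPtl hinv'
      refine CellInv_congr _ _ _ _ (fun i j hz => ?_) hres
      rw [Bool.eq_iff_iff]
      simp only [covB, List.any_cons, Bool.or_eq_true, Bool.and_eq_true, decide_eq_true_eq,
        beq_iff_eq, h1, true_and, List.any_eq_true]
      constructor
      · rintro (h | h | h)
        · exact Or.inl (Or.inr h)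
        · exact Or.inl (Or.inl h)
        · exact Or.inr h
      · rintro ((h | h) | h)
        · exact Or.inr (Or.inl h)
        · exact Or.inl h
        · exact Or.inr (Or.inr h)
    · rw [if_neg (fun hx => h1 (hc1.mp hx))]
      have hres := ih _ _ hPtl ⟨hl, hr, hc⟩
      refine CellInv_congr _ _ _ _ (fun i j hz => ?_) hres
      rw [Bool.eq_iff_iff]
      simp only [covB, List.any_cons, Bool.or_eq_true, Bool.and_eq_true, decide_eq_true_eq,
        beq_iff_eq, h1, false_and, List.any_eq_true]
      rw [false_or]

def allPairs (nn : Nat) : List (Nat × Nat) :=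
  (List.range nn).flatMap fun i => (List.range nn).map (fun j => (i, j))

lemma mem_allPairs (nn x y : Nat) : (x, y) ∈ allPairs nn ↔ x < nn ∧ y < nn := by
  simp only [allPairs, List.mem_flatMap, List.mem_map, List.mem_range, Prod.mk.injEq]
  constructor
  · rintro ⟨a, ha, c, hc, rfl, rfl⟩; exact ⟨ha, hc⟩
  · rintro ⟨hx, hy⟩; exact ⟨x, hx, y, hy, rfl, rfl⟩

lemma nodup_allPairs (nn : Nat) : (allPairs nn).Nodup := by
  unfold allPairs
  refine List.nodup_flatMap.mpr ⟨fun a _ => ?_, ?_⟩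
  · exact (List.nodup_range).map (fun x y h => (Prod.mk.injEq ..).mp h |>.2)
  · refine List.Pairwise.imp ?_ (List.nodup_range (n := nn))
    intro a b hab
    simp only [Function.onFun, List.disjoint_left, List.mem_map]
    rintro x ⟨j, _, rfl⟩ ⟨k, _, hx⟩
    exact hab ((Prod.mk.injEq ..).mp hx |>.1.symm)

lemma covB_allPairs (b0 : List (List Int)) (i j : Nat) :
    covB b0 b0.length (allPairs b0.length) i j
      = (near1B b0 b0.length i j && decide (i < b0.length) && decide (j < b0.length)) := by
  rw [Bool.eq_iff_iff]
  simp only [covB, near1B, List.any_eq_true, Bool.and_eq_true, decide_eq_true_eq, beq_iff_eq]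
  constructor
  · rintro ⟨⟨x, y⟩, hmem, ⟨hcell, hx⟩, hy⟩
    obtain ⟨hxn, hyn⟩ := (mem_allPairs ..).mp hmem
    have hi := (mem_pvWin i x b0.length).mp hx
    have hj := (mem_pvWin j y b0.length).mp hy
    exact ⟨⟨⟨x, (mem_pvWin ..).mpr (by omega), y, (mem_pvWin ..).mpr (by omega), hcell⟩,
      by omega⟩, by omega⟩
  · rintro ⟨⟨⟨x, hx, y, hy, hcell⟩, hi⟩, hj⟩
    have hxw := (mem_pvWin x i b0.length).mp hx
    have hyw := (mem_pvWin y j b0.length).mp hy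
    exact ⟨(x, y), (mem_allPairs ..).mpr (by omega),
      ⟨hcell, (mem_pvWin ..).mpr (by omega)⟩, (mem_pvWin ..).mpr (by omega)⟩

-- B's marking fold: each processed 0 cell with a 1-neighbour is overwritten by 2
lemma markB_fold (b0 : List (List Int)) (hpre : Pre_solution b0) :
    ∀ (P : List (Nat × Nat)) (s : Nat → Nat → Bool) (b : List (List Int)),
    (∀ p ∈ P, p.1 < b0.length ∧ p.2 < b0.length) → P.Nodup →
    (∀ p ∈ P, s p.1 p.2 = false) →
    CellInv b0 s b →
    CellInv b0 (fun i j => s i j || (decide ((i, j) ∈ P) && near1B b0 b0.length i j))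
      (P.foldl (fun b p => markStepB b0.length b p.1 p.2) b) := by
  intro P
  induction P with
  | nil =>
    intro s b _ _ _ hinv
    exact CellInv_congr _ _ _ _ (fun i j _ => by simp) hinv
  | cons hd tl ih =>
    obtain ⟨p, q⟩ := hd
    intro s b hP hnd hs0 hinv
    have hpn : p < b0.length := (hP (p, q) (List.mem_cons.mpr (Or.inl rfl))).1
    have hqn : q < b0.length := (hP (p, q) (List.mem_cons.mpr (Or.inl rfl))).2
    have hspq : s p q = false := hs0 (p, q) (List.mem_cons.mpr (Or.inl rfl))
    obtain ⟨hl, hr, hc⟩ := hinv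
    have hcb : pvCell b p q = pvCell b0 p q := by rw [hc p q, hspq]; simp
    have hnb : near1B b b0.length p q = near1B b0 b0.length p q :=
      near1B_inv b0 s b ⟨hl, hr, hc⟩ ..
    have hPtl : ∀ r ∈ tl, r.1 < b0.length ∧ r.2 < b0.length :=
      fun r hr' => hP r (List.mem_cons_of_mem _ hr')
    have hndtl : tl.Nodup := (List.nodup_cons.mp hnd).2
    have hnotmem : (p, q) ∉ tl := (List.nodup_cons.mp hnd).1
    rw [List.foldl_cons]
    by_cases hz : pvCell b0 p q = 0 ∧ near1B b0 b0.length p q = true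
    · have hstep : markStepB b0.length b p q = pvSet b p q 2 := by
        unfold markStepB
        rw [if_pos ⟨by rw [hcb]; exact hz.1, by rw [hnb]; exact hz.2⟩]
      rw [hstep]
      have hinv2 : CellInv b0 (fun i j => s i j || (decide (i = p) && decide (j = q)))
          (pvSet b p q 2) := by
        refine ⟨by rw [length_pvSet, hl], fun i => by rw [rowlen_pvSet]; exact hr i,
          fun i j => ?_⟩
        rw [cell_pvSet]
        by_cases hij : p = i ∧ q = j
        · obtain ⟨rfl, rfl⟩ := hij
          rw [if_pos ⟨rfl, rfl, by rw [hl]; exact hpn,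
            by rw [hr p]; exact lt_of_lt_of_le hqn (pre_rowlen b0 hpre p hpn)⟩]
          rw [if_pos (by simp [hz.1])]
        · rw [if_neg (fun hx => hij ⟨hx.1, hx.2.1⟩), hc i j]
          have hd : (decide (i = p) && decide (j = q)) = false := by
            rcases not_and_or.mp hij with hne | hne
            · simp [show i ≠ p from fun h => hne h.symm]
            · simp [show j ≠ q from fun h => hne h.symm]
          simp only [hd, Bool.or_false]
      have hres := ih (fun i j => s i j || (decide (i = p) && decide (j = q)))
        (pvSet b p q 2) hPtl hndtl
        (fun r hr' => by
          dsimp only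
          rw [hs0 r (List.mem_cons_of_mem _ hr')]
          have : ¬(r.1 = p ∧ r.2 = q) := by
            rintro ⟨h1, h2⟩
            exact hnotmem (by rw [← h1, ← h2]; exact hr')
          rcases not_and_or.mp this with hne | hne <;> simp [hne]) hinv2
      refine CellInv_congr _ _ _ _ (fun i j hz0 => ?_) hres
      rw [Bool.eq_iff_iff]
      simp only [Bool.or_eq_true, Bool.and_eq_true, decide_eq_true_eq, List.mem_cons,
        Prod.mk.injEq]
      constructor
      · rintro ((hs | ⟨rfl, rfl⟩) | ⟨hmem, hn⟩)
        · exact Or.inl hs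
        · exact Or.inr ⟨Or.inl ⟨rfl, rfl⟩, hz.2⟩
        · exact Or.inr ⟨Or.inr hmem, hn⟩
      · rintro (hs | ⟨(⟨rfl, rfl⟩ | hmem), hn⟩)
        · exact Or.inl (Or.inl hs)
        · exact Or.inl (Or.inr ⟨rfl, rfl⟩)
        · exact Or.inr ⟨hmem, hn⟩
    · have hstep : markStepB b0.length b p q = b := by
        unfold markStepB
        rw [if_neg (by rw [hcb, hnb]; exact hz)]
      rw [hstep]
      have hres := ih s b hPtl hndtl
        (fun r hr' => hs0 r (List.mem_cons_of_mem _ hr')) ⟨hl, hr, hc⟩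
      refine CellInv_congr _ _ _ _ (fun i j hz0 => ?_) hres
      rw [Bool.eq_iff_iff]
      simp only [Bool.or_eq_true, Bool.and_eq_true, decide_eq_true_eq, List.mem_cons,
        Prod.mk.injEq]
      constructor
      · rintro (hs | ⟨hmem, hn⟩)
        · exact Or.inl hs
        · exact Or.inr ⟨Or.inr hmem, hn⟩
      · rintro (hs | ⟨(⟨rfl, rfl⟩ | hmem), hn⟩)
        · exact Or.inl hs
        · exact absurd ⟨hz0, hn⟩ hz
        · exact Or.inr ⟨hmem, hn⟩

-- two boards satisfying the same cell invariant over b0 are equal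
lemma CellInv_unique (b0 : List (List Int)) (s : Nat → Nat → Bool) (bA bB : List (List Int))
    (hA : CellInv b0 s bA) (hB : CellInv b0 s bB) : bA = bB := by
  obtain ⟨hAl, hAr, hAc⟩ := hA
  obtain ⟨hBl, hBr, hBc⟩ := hB
  apply List.ext_getElem (by rw [hAl, hBl])
  intro i h1 h2
  have hrow : (bA.getD i []).length = (bB.getD i []).length := by rw [hAr i, hBr i]
  have hgA : bA.getD i [] = bA[i] := List.getD_eq_getElem _ _ h1
  have hgB : bB.getD i [] = bB[i] := List.getD_eq_getElem _ _ h2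
  rw [← hgA, ← hgB]
  apply List.ext_getElem hrow
  intro j hj1 hj2
  have hcA : (bA.getD i []).getD j 0 = (bA.getD i [])[j] := List.getD_eq_getElem _ _ hj1
  have hcB : (bB.getD i []).getD j 0 = (bB.getD i [])[j] := List.getD_eq_getElem _ _ hj2
  rw [← hcA, ← hcB]
  show pvCell bA i j = pvCell bB i j
  rw [hAc i j, hBc i j]

-- summing row counts: over range-of-indices vs over the rows themselves
lemma foldl_count_rows (b : List (List Int)) :
    (List.range b.length).foldl (fun ans k => ans + (PySem.List.count (b.getD k []) 0 : Int)) 0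
      = b.foldl (fun ans row => ans + (PySem.List.count row 0 : Int)) 0 := by
  rw [PySem.List.foldl_add, PySem.List.foldl_add]
  refine congrArg (fun l => (0 : Int) + List.sum l) ?_
  apply List.ext_getElem (by simp)
  intro k h1 h2
  simp only [List.getElem_map, List.getElem_range]
  rw [List.getD_eq_getElem _ _ (by simpa using h2)]

-- ===== VERDICT (by name: the statement is the Claim_ definition above) =====
theorem solution_spec : Claim_equal_solution := by
  intro board _hdom hpre
  unfold Spec_solution solution solution_alt
  dsimp only
  have hnestA : (List.range board.length).foldl (fun b i =>
      (List.range board.length).foldl (fun b j => markStep board.length b i j) b) board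
      = (allPairs board.length).foldl (fun b p => markStep board.length b p.1 p.2) board :=
    foldl_nest (fun b i j => markStep board.length b i j) _ _ _
  have hnestB : (List.range board.length).foldl (fun b i =>
      (List.range board.length).foldl (fun b j => markStepB board.length b i j) b) board
      = (allPairs board.length).foldl (fun b p => markStepB board.length b p.1 p.2) board :=
    foldl_nest (fun b i j => markStepB board.length b i j) _ _ _
  rw [hnestA, hnestB]
  have hbounds : ∀ p ∈ allPairs board.length, p.1 < board.length ∧ p.2 < board.length := by
    rintro ⟨x, y⟩ hmem
    exact (mem_allPairs ..).mp hmem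
  have hinv0 : CellInv board (fun _ _ => false) board :=
    ⟨rfl, fun _ => rfl, fun i j => by simp⟩
  have hA := markA_fold board hpre (allPairs board.length) (fun _ _ => false) board
    hbounds hinv0
  have hB := markB_fold board hpre (allPairs board.length) (fun _ _ => false) board
    hbounds (nodup_allPairs _) (fun _ _ => rfl) hinv0
  have hA' : CellInv board
      (fun i j => decide ((i, j) ∈ allPairs board.length) && near1B board board.length i j)
      ((allPairs board.length).foldl (fun b p => markStep board.length b p.1 p.2) board) := by
    refine CellInv_congr _ _ _ _ (fun i j _ => ?_) hA
    rw [Bool.or_false, covB_allPairs, Bool.eq_iff_iff]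
    simp only [Bool.and_eq_true, decide_eq_true_eq, mem_allPairs]
    tauto
  have hB' : CellInv board
      (fun i j => decide ((i, j) ∈ allPairs board.length) && near1B board board.length i j)
      ((allPairs board.length).foldl (fun b p => markStepB board.length b p.1 p.2) board) := by
    refine CellInv_congr _ _ _ _ (fun i j _ => ?_) hB
    rw [Bool.false_or]
  have heq := CellInv_unique board _ _ _ hA' hB'
  rw [heq]
  have hlen : ((allPairs board.length).foldl
      (fun b p => markStepB board.length b p.1 p.2) board).length = board.length := hB'.1
  rw [← foldl_count_rows, hlen]
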